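-- pv_equiv track=rewrite | github.com/mechatroner/sublime_rainbow_csv | main.py | get_col_num_single_line
-- ===== SOURCE A (Python) =====
-- def get_col_num_single_line(fields, delim_size, query_pos, offset=0):
--     if not len(fields):
--         return None
--     col_num = 0
--     cpos = offset + len(fields[col_num]) + delim_size
--     while query_pos >= cpos and col_num + 1 < len(fields):
--         col_num += 1
--         cpos += len(fields[col_num]) + delim_size
--     return col_num
-- ===== SOURCE B (Python) =====
-- def get_col_num_single_line(fields, delim_size, query_pos, offset=0):
--     if not fields:
--         return None
--     # pass 1: prefix-boundary table; boundaries[i] = end position of column i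
--     boundaries = []
--     acc = offset
--     for f in fields:
--         acc += len(f) + delim_size
--         boundaries.append(acc)
--     # pass 2: first column whose boundary strictly exceeds query_pos; default = last column
--     for i, b in enumerate(boundaries):
--         if query_pos < b:
--             return i
--     return len(fields) - 1
-- ===== Notes on version B (the rewrite author's own statement) =====
-- stated objective: alternative
-- what changed: Replaces A's single while-loop that fuses the running accumulator with the stopping test by a two-phase decomposition: build the prefix-boundary table of column end positions, then return the first index whose boundary strictly exceeds query_pos, defaulting to the last column.
import Mathlib
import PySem

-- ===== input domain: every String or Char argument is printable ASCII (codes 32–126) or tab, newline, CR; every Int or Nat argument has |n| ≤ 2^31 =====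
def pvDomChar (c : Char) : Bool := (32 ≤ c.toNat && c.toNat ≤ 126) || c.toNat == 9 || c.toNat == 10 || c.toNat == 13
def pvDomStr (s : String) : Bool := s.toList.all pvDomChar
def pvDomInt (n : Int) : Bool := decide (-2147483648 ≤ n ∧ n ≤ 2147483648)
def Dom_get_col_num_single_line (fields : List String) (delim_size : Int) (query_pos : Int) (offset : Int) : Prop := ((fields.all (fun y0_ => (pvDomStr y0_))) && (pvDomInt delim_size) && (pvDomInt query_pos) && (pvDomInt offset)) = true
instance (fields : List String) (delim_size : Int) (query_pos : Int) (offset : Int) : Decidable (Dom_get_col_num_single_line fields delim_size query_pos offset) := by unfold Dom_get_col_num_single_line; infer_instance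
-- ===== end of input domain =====

-- B replaces A's fused while-loop by a two-phase decomposition (prefix-boundary
-- table, then first boundary exceeding query_pos, defaulting to the last column);
-- same cost, different structure.

-- ===== PORT A =====
-- the while loop: col_num / cpos state, condition and updates exactly as in A
def pvALoop (fields : List String) (delim_size query_pos : Int) (col : Nat) (cpos : Int) : Nat :=
  if query_pos ≥ cpos ∧ col + 1 < fields.length then
    pvALoop fields delim_size query_pos (col + 1)
      (cpos + PySem.Str.len (fields.getD (col + 1) "") + delim_size)
  else col
termination_by fields.length - col
decreasing_by omega

def get_col_num_single_line (fields : List String) (delim_size : Int) (query_pos : Int) (offset : Int) : Option Int :=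
  if fields.length = 0 then none
  else
    some ((pvALoop fields delim_size query_pos 0
      (offset + PySem.Str.len (fields.getD 0 "") + delim_size) : Nat) : Int)

-- ===== PORT B =====
-- pass 1 of Source B: the prefix-boundary table (acc runs over the fields)
def pvBounds (delim_size : Int) : List String → Int → List Int
  | [], _ => []
  | f :: rest, acc =>
    let acc' := acc + PySem.Str.len f + delim_size
    acc' :: pvBounds delim_size rest acc'

-- pass 2 of Source B: first index whose boundary strictly exceeds query_pos
def pvFindCol (query_pos : Int) : List Int → Nat → Option Nat
  | [], _ => none
  | b :: rest, i => if query_pos < b then some i else pvFindCol query_pos rest (i + 1)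

def get_col_num_single_line_alt (fields : List String) (delim_size : Int) (query_pos : Int) (offset : Int) : Option Int :=
  if fields = [] then none
  else
    match pvFindCol query_pos (pvBounds delim_size fields offset) 0 with
    | some i => some (i : Int)
    | none => some ((fields.length : Int) - 1)

-- ===== PRECONDITION & SPEC =====
def Spec_get_col_num_single_line (fields : List String) (delim_size : Int) (query_pos : Int) (offset : Int) (out : Option Int) : Prop := out = get_col_num_single_line_alt fields delim_size query_pos offset
instance (fields : List String) (delim_size : Int) (query_pos : Int) (offset : Int) (out : Option Int) : Decidable (Spec_get_col_num_single_line fields delim_size query_pos offset out) := by unfold Spec_get_col_num_single_line; infer_instance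

-- ===== CLAIM (what is proved, stated in full; the proofs are below) =====
def Claim_equal_get_col_num_single_line : Prop := ∀ (fields : List String) (delim_size : Int) (query_pos : Int) (offset : Int), Dom_get_col_num_single_line fields delim_size query_pos offset → Spec_get_col_num_single_line fields delim_size query_pos offset (get_col_num_single_line fields delim_size query_pos offset)

-- ===== LEMMAS AND PROOFS =====

theorem length_pvBounds (d : Int) (fields : List String) (acc : Int) :
    (pvBounds d fields acc).length = fields.length := by
  induction fields generalizing acc with
  | nil => simp [pvBounds]
  | cons f rest ih => simp [pvBounds, ih]

theorem pvBounds_getD_zero (d : Int) (fields : List String) (acc : Int) (h : fields ≠ []) :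
    (pvBounds d fields acc).getD 0 0 = acc + PySem.Str.len (fields.getD 0 "") + d := by
  cases fields with
  | nil => exact absurd rfl h
  | cons f rest => simp [pvBounds]

theorem pvBounds_getD_succ (d : Int) (fields : List String) (acc : Int) (i : Nat)
    (h : i + 1 < fields.length) :
    (pvBounds d fields acc).getD (i + 1) 0
      = (pvBounds d fields acc).getD i 0 + PySem.Str.len (fields.getD (i + 1) "") + d := by
  induction fields generalizing acc i with
  | nil => simp at h
  | cons f rest ih =>
    cases i with
    | zero =>
      have hr : rest ≠ [] := by
        simp at h; exact List.ne_nil_of_length_pos (by omega)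
      simpa [pvBounds] using pvBounds_getD_zero d rest (acc + PySem.Str.len f + d) hr
    | succ j =>
      have h' : j + 1 < rest.length := by simp at h; omega
      simpa [pvBounds] using ih (acc + PySem.Str.len f + d) j h'

theorem pvALoop_eq (fields : List String) (d q acc : Int) :
    ∀ (k col : Nat), fields.length - col ≤ k → col < fields.length →
    pvALoop fields d q col ((pvBounds d fields acc).getD col 0)
      = (pvFindCol q ((pvBounds d fields acc).drop col) col).getD (fields.length - 1) := by
  intro k
  induction k with
  | zero => intro col hk hcol; omega
  | succ k ih =>
    intro col hk hcol
    have hlen : (pvBounds d fields acc).length = fields.length := length_pvBounds d fields acc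
    have hcol' : col < (pvBounds d fields acc).length := by omega
    have hdrop : (pvBounds d fields acc).drop col
        = (pvBounds d fields acc)[col] :: (pvBounds d fields acc).drop (col + 1) :=
      List.drop_eq_getElem_cons hcol'
    have hgetD : (pvBounds d fields acc).getD col 0 = (pvBounds d fields acc)[col] :=
      List.getD_eq_getElem _ _ hcol'
    rw [pvALoop, hdrop]
    by_cases hq : q < (pvBounds d fields acc)[col]
    · have : ¬ (q ≥ (pvBounds d fields acc).getD col 0 ∧ col + 1 < fields.length) := by
        rw [hgetD]; omega
      rw [if_neg this]
      simp [pvFindCol, hq]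
    · by_cases hc : col + 1 < fields.length
      · have hcond : q ≥ (pvBounds d fields acc).getD col 0 ∧ col + 1 < fields.length := by
          rw [hgetD]; exact ⟨by omega, hc⟩
        rw [if_pos hcond]
        have hstep : (pvBounds d fields acc).getD col 0 + PySem.Str.len (fields.getD (col + 1) "") + d
            = (pvBounds d fields acc).getD (col + 1) 0 :=
          (pvBounds_getD_succ d fields acc col hc).symm
        rw [hstep]
        rw [ih (col + 1) (by omega) hc]
        simp [pvFindCol, hq]
      · have : ¬ (q ≥ (pvBounds d fields acc).getD col 0 ∧ col + 1 < fields.length) := by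
          intro h; exact hc h.2
        rw [if_neg this]
        have hdrop2 : (pvBounds d fields acc).drop (col + 1) = [] := by
          apply List.drop_eq_nil_of_le; omega
        rw [hdrop2]
        simp [pvFindCol, hq]
        omega

-- ===== VERDICT (by name: the statement is the Claim_ definition above) =====
theorem get_col_num_single_line_spec : Claim_equal_get_col_num_single_line := by
  unfold Claim_equal_get_col_num_single_line
  intro fields d q off _
  unfold Spec_get_col_num_single_line
  unfold get_col_num_single_line get_col_num_single_line_alt
  by_cases hnil : fields = []
  · simp [hnil]
  · have hlen0 : fields.length ≠ 0 := by simpa using (List.length_pos_iff.mpr hnil).ne'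
    rw [if_neg hlen0, if_neg hnil]
    have hpos : 0 < fields.length := Nat.pos_of_ne_zero hlen0
    have hz := pvBounds_getD_zero d fields off hnil
    have hmain := pvALoop_eq fields d q off fields.length 0 (by omega) hpos
    rw [List.drop_zero] at hmain
    rw [← hz]
    rw [hmain]
    cases hfc : pvFindCol q (pvBounds d fields off) 0 with
    | some i => simp
    | none =>
      simp
      omega
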